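-- pv_equiv track=rewrite | github.com/charlesyangc/ece661 | hw7_ LBP_kNN/LBP_kNN.py | get_minbv
-- ===== SOURCE A (Python) =====
-- def construct_int_from_bin(bin):
-- 	r = 0
-- 	for i in range(len(bin)):
-- 		r = r + bin[i] * ( 2 ** (len(bin) - i - 1) )
-- 	return r
--
-- def get_minbv(pattern):
-- 	P = len(pattern)
-- 	minbv = construct_int_from_bin(pattern)
-- 	for i in range(P):
-- 		container = pattern[0]
-- 		for j in range(P - 1):
-- 			pattern[j] = pattern[j + 1]
-- 		pattern[P - 1] = container
--
-- 		minbv_cand = construct_int_from_bin(pattern)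
-- 		if (minbv_cand < minbv):
-- 			minbv = minbv_cand
--
-- 	return minbv
-- ===== SOURCE B (Python) =====
-- def get_minbv(pattern):
--     P = len(pattern)
--     v = 0
--     for b in pattern:
--         v = v * 2 + b
--     m = v
--     top = 2 ** P // 2
--     for b in pattern:
--         v = (v - b * top) * 2 + b
--         if v < m:
--             m = v
--     return m
-- ===== Notes on version B (the rewrite author's own statement) =====
-- stated objective: faster
-- what changed: B replaces A's O(P) re-scoring of each of the P rotations (each built element-by-element and re-converted to an integer) by one Horner pass computing the initial value and an O(1) shift-update formula per rotation.
import Mathlib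
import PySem

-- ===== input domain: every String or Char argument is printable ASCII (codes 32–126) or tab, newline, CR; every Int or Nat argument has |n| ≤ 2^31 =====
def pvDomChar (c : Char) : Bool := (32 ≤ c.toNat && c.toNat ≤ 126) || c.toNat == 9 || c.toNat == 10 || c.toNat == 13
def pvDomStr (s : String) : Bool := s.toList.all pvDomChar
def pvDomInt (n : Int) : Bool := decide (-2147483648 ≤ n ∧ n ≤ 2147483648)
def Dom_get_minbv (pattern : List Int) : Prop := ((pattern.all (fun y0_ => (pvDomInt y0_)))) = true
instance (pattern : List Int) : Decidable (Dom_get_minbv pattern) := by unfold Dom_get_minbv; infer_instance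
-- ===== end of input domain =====

-- B replaces A's quadratic re-scoring of each rotation by a single Horner pass plus an O(1)
-- shift update per rotation (faster, asymptotic). A mutates its argument in Python but the net
-- mutation after the full loop is the identity; the equivalence proved here is about the return value.


-- ===== PORT A =====
-- construct_int_from_bin: r += bin[i] * 2^(len-i-1) over i in range(len); indices are always in range
def construct_int_from_bin (bin : List Int) : Int :=
  (List.range bin.length).foldl
    (fun r i => r + bin.getD i 0 * 2 ^ (bin.length - i - 1)) 0

-- A's body: P rotations, each performed element-wise exactly as the Python inner loop does
def get_minbv (pattern : List Int) : Int :=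
  let P := pattern.length
  let minbv := construct_int_from_bin pattern
  ((List.range P).foldl
    (fun (st : List Int × Int) _ =>
      let container := st.1.getD 0 0
      let pat := (List.range (P - 1)).foldl (fun p j => p.set j (p.getD (j + 1) 0)) st.1
      let pat := pat.set (P - 1) container
      let cand := construct_int_from_bin pat
      (pat, if cand < st.2 then cand else st.2))
    (pattern, minbv)).2

-- ===== PORT B =====
def get_minbv_alt (pattern : List Int) : Int :=
  let P := pattern.length
  let v := pattern.foldl (fun v b => v * 2 + b) 0
  let top : Int := PySem.Int.floordiv (2 ^ P) 2
  (pattern.foldl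
    (fun (st : Int × Int) b =>
      let v' := (st.1 - b * top) * 2 + b
      (v', if v' < st.2 then v' else st.2))
    (v, v)).2

-- ===== PRECONDITION & SPEC =====
def Spec_get_minbv (pattern : List Int) (out : Int) : Prop := out = get_minbv_alt pattern
instance (pattern : List Int) (out : Int) : Decidable (Spec_get_minbv pattern out) := by unfold Spec_get_minbv; infer_instance

-- ===== CLAIM (what is proved, stated in full; the proofs are below) =====
def Claim_equal_get_minbv : Prop := ∀ (pattern : List Int), Dom_get_minbv pattern → Spec_get_minbv pattern (get_minbv pattern)

-- ===== LEMMAS AND PROOFS =====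

-- the value of a bit list, most significant first
def pvVal : List Int → Int
  | [] => 0
  | b :: t => b * 2 ^ t.length + pvVal t

theorem pvVal_append_singleton (t : List Int) (b : Int) :
    pvVal (t ++ [b]) = 2 * pvVal t + b := by
  induction t with
  | nil => simp [pvVal]
  | cons x t ih =>
      simp only [List.cons_append, pvVal, ih, List.length_append, List.length_cons,
        List.length_nil, pow_succ]
      ring

theorem foldl_add_gen (g : Nat → Int) (l : List Nat) (a : Int) :
    l.foldl (fun r i => r + g i) a = a + l.foldl (fun r i => r + g i) 0 := by
  induction l generalizing a with
  | nil => simp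
  | cons x l ih => simp only [List.foldl_cons]; rw [ih, ih (0 + g x)]; ring

theorem cifb_eq_pvVal (l : List Int) : construct_int_from_bin l = pvVal l := by
  induction l with
  | nil => simp [construct_int_from_bin, pvVal]
  | cons b t ih =>
      unfold construct_int_from_bin at *
      rw [List.length_cons, List.range_succ_eq_map, List.foldl_cons, List.foldl_map]
      simp only [List.getD_cons_zero, List.getD_cons_succ, Nat.sub_zero, Nat.add_sub_cancel,
        zero_add]
      have hfun : (fun (x : Int) (y : Nat) => x + t.getD y 0 * 2 ^ (t.length + 1 - y.succ - 1))
          = fun (x : Int) (y : Nat) => x + t.getD y 0 * 2 ^ (t.length - y - 1) := by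
        funext x y
        have he : t.length + 1 - y.succ - 1 = t.length - y - 1 := by omega
        rw [he]
      rw [hfun, foldl_add_gen (fun i => t.getD i 0 * 2 ^ (t.length - i - 1)), ih, pvVal]

theorem horner_eq_pvVal (l : List Int) (a : Int) :
    l.foldl (fun v b => v * 2 + b) a = a * 2 ^ l.length + pvVal l := by
  induction l generalizing a with
  | nil => simp [pvVal]
  | cons b t ih =>
      simp only [List.foldl_cons, ih, pvVal, List.length_cons]
      rw [pow_succ]
      ring

-- A's element-wise inner loop, characterised after n steps
theorem shift_loop_eq (pat : List Int) : ∀ n, n < pat.length →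
    (List.range n).foldl (fun p j => p.set j (p.getD (j + 1) 0)) pat
      = (pat.drop 1).take n ++ pat.drop n := by
  intro n
  induction n with
  | zero => simp
  | succ n ih =>
      intro h
      rw [List.range_succ, List.foldl_append, List.foldl_cons, List.foldl_nil, ih (by omega)]
      have hA : ((pat.drop 1).take n).length = n := by simp; omega
      have hd1 : pat.drop n = pat[n] :: pat.drop (n + 1) :=
        List.drop_eq_getElem_cons (by omega)
      have hd2 : pat.drop (n + 1) = pat[n + 1] :: pat.drop (n + 2) :=
        List.drop_eq_getElem_cons (by omega)
      have hget : (((pat.drop 1).take n) ++ pat.drop n).getD (n + 1) 0 = pat[n + 1] := by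
        rw [List.getD_eq_getElem?_getD, List.getElem?_append_right (by omega), hA, hd1, hd2]
        simp [List.getElem?_eq_getElem (show n + 1 < pat.length by omega)]
      rw [hget, List.set_append, if_neg (by omega), hA]
      have hset : (pat.drop n).set (n - n) pat[n + 1] = pat[n + 1] :: pat.drop (n + 1) := by
        rw [Nat.sub_self, hd1, List.set_cons_zero]
      rw [hset, List.take_add_one]
      have heq : (pat.drop 1)[n]? = some pat[n + 1] := by
        have h1 : 1 + n = n + 1 := by omega
        rw [List.getElem?_drop, h1, List.getElem?_eq_getElem (by omega)]
      rw [heq]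
      simp

theorem rot_step_eq (pat : List Int) (hne : pat ≠ []) :
    (((List.range (pat.length - 1)).foldl (fun p j => p.set j (p.getD (j + 1) 0)) pat).set
      (pat.length - 1) (pat.getD 0 0)) = pat.drop 1 ++ [pat.getD 0 0] := by
  have hP : 1 ≤ pat.length := List.length_pos_iff.mpr hne
  rw [shift_loop_eq pat (pat.length - 1) (by omega)]
  have htake : (pat.drop 1).take (pat.length - 1) = pat.drop 1 := by
    apply List.take_of_length_le
    simp
  have hdrop : pat.drop (pat.length - 1) = [pat[pat.length - 1]] := by
    rw [List.drop_eq_getElem_cons (by omega)]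
    have : pat.length - 1 + 1 = pat.length := by omega
    rw [this, List.drop_length]
  rw [htake, hdrop, List.set_append, if_neg (by simp)]
  have : pat.length - 1 - (pat.drop 1).length = 0 := by simp
  rw [this]
  simp

-- the bridge: A's rotation fold and B's shift fold compute the same minimum
theorem bridge (P : Nat) (t s : List Int) (m : Int) (hP : (t ++ s).length = P) :
    ((List.range t.length).foldl
      (fun (st : List Int × Int) _ =>
        let pat := st.1.drop 1 ++ [st.1.getD 0 0]
        let cand := pvVal pat
        (pat, if cand < st.2 then cand else st.2))
      (t ++ s, m)).2 =
    (t.foldl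
      (fun (st : Int × Int) b =>
        let v' := (st.1 - b * 2 ^ (P - 1)) * 2 + b
        (v', if v' < st.2 then v' else st.2))
      (pvVal (t ++ s), m)).2 := by
  induction t generalizing s m with
  | nil => simp
  | cons b t ih =>
      rw [List.length_cons, List.range_succ_eq_map, List.foldl_cons, List.foldl_map,
        List.foldl_cons]
      simp only [List.cons_append, List.drop_succ_cons, List.drop_zero, List.getD_cons_zero]
      have hlen : (t ++ s).length = P - 1 := by simp at hP ⊢; omega
      have hval : pvVal (t ++ s ++ [b]) = (pvVal (b :: (t ++ s)) - b * 2 ^ (P - 1)) * 2 + b := by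
        rw [pvVal_append_singleton]
        simp only [pvVal]
        rw [hlen]
        ring
      rw [← hval]
      have h := ih (s ++ [b]) (if pvVal (t ++ s ++ [b]) < m then pvVal (t ++ s ++ [b]) else m)
        (by simp at hP ⊢; omega)
      rw [← List.append_assoc] at h
      exact h

-- A's fold with the element-wise rotation equals the fold with the list rotation (length invariant)
theorem a_fold_rot (P : Nat) (l : List Nat) (pat : List Int) (m : Int)
    (hlen : pat.length = P) (hP : 0 < P) :
    (l.foldl
      (fun (st : List Int × Int) _ =>
        let container := st.1.getD 0 0
        let p := (List.range (P - 1)).foldl (fun p j => p.set j (p.getD (j + 1) 0)) st.1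
        let p := p.set (P - 1) container
        let cand := construct_int_from_bin p
        (p, if cand < st.2 then cand else st.2))
      (pat, m)) =
    (l.foldl
      (fun (st : List Int × Int) _ =>
        let p := st.1.drop 1 ++ [st.1.getD 0 0]
        let cand := pvVal p
        (p, if cand < st.2 then cand else st.2))
      (pat, m)) := by
  induction l generalizing pat m with
  | nil => rfl
  | cons x l ih =>
      simp only [List.foldl_cons]
      have hne : pat ≠ [] := by intro h; subst h; simp at hlen; omega
      have hr := rot_step_eq pat hne
      rw [hlen] at hr
      rw [hr, cifb_eq_pvVal]
      exact ih _ _ (by simp; omega) 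

theorem top_eq (P : Nat) (hP : 1 ≤ P) : PySem.Int.floordiv (2 ^ P) 2 = 2 ^ (P - 1) := by
  rw [PySem.Int.floordiv_eq_ediv_of_pos (by norm_num)]
  cases P with
  | zero => omega
  | succ n =>
      rw [pow_succ, Nat.succ_sub_one]
      exact Int.mul_ediv_cancel _ (by norm_num)

-- ===== VERDICT (by name: the statement is the Claim_ definition above) =====
theorem get_minbv_spec : Claim_equal_get_minbv := by
  intro pattern _
  unfold Spec_get_minbv
  cases pattern with
  | nil => decide
  | cons b t =>
      unfold get_minbv get_minbv_alt
      simp only []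
      rw [top_eq _ (by simp), horner_eq_pvVal, cifb_eq_pvVal]
      rw [a_fold_rot (b :: t).length _ _ _ rfl (by simp)]
      have h := bridge (b :: t).length (b :: t) [] (pvVal (b :: t)) (by simp)
      simp only [List.append_nil] at h
      simp only [zero_mul, zero_add]
      exact h
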